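-- pv_equiv track=rewrite | github.com/cirosantilli/project-euler-solutions | solvers/834.py | divisors_with_prefix
-- ===== SOURCE A (Python) =====
-- def divisors_with_prefix(
--     odd_x: int, spf: list[int]
-- ) -> tuple[list[int], list[int], int]:
--     """Return (sorted_divisors, prefix_sums, total_sum) for an odd positive integer."""
--     if odd_x == 1:
--         divs = [1]
--         pre = [0, 1]
--         return divs, pre, 1
--
--     # Factorization via SPF
--     factors: list[tuple[int, int]] = []
--     x = odd_x
--     while x > 1:
--         p = spf[x]
--         e = 0
--         while x % p == 0:
--             x //= p
--             e += 1
--         factors.append((p, e))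
--
--     # Generate divisors
--     divs = [1]
--     for p, e in factors:
--         base = divs[:]  # current divisors
--         mult = 1
--         for _ in range(e):
--             mult *= p
--             for d in base:
--                 divs.append(d * mult)
--
--     divs.sort()
--
--     pre = [0] * (len(divs) + 1)
--     s = 0
--     for i, v in enumerate(divs, 1):
--         s += v
--         pre[i] = s
--     return divs, pre, s
-- ===== SOURCE B (Python) =====
-- def _merge(a, b):
--     """Merge two sorted lists into one sorted list (two-pointer)."""
--     out = []
--     i = j = 0
--     while i < len(a) and j < len(b):
--         if a[i] <= b[j]:
--             out.append(a[i]); i += 1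
--         else:
--             out.append(b[j]); j += 1
--     out.extend(a[i:])
--     out.extend(b[j:])
--     return out
--
--
-- def divisors_with_prefix(
--     odd_x: int, spf: list[int]
-- ) -> tuple[list[int], list[int], int]:
--     """Return (sorted_divisors, prefix_sums, total_sum) for an odd positive integer."""
--     if odd_x == 1:
--         return [1], [0, 1], 1
--
--     # Factorization via SPF (same chain as the reference)
--     factors: list[tuple[int, int]] = []
--     x = odd_x
--     while x > 1:
--         p = spf[x]
--         e = 0
--         while x % p == 0:
--             x //= p
--             e += 1
--         factors.append((p, e))
--
--     # Divisors sorted by construction: for each prime power merge the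
--     # sorted runs [d * p**k for d in divs] into the current sorted list.
--     divs = [1]
--     for p, e in factors:
--         run = divs
--         mult = 1
--         for _ in range(e):
--             mult *= p
--             run = _merge(run, [d * mult for d in divs])
--         divs = run
--
--     # Prefix sums with a leading 0, built by appending
--     pre = [0]
--     s = 0
--     for v in divs:
--         s += v
--         pre.append(s)
--     return divs, pre, s
-- ===== Notes on version B (the rewrite author's own statement) =====
-- stated objective: alternative
-- what changed: B never sorts: for each prime-power factor it two-pointer-merges the sorted run [d*mult for d in divs] into the current sorted divisor list, so the divisors come out sorted by construction, and it builds the prefix list by appending instead of preallocating [0]*(n+1) and writing by index.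
import Mathlib
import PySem

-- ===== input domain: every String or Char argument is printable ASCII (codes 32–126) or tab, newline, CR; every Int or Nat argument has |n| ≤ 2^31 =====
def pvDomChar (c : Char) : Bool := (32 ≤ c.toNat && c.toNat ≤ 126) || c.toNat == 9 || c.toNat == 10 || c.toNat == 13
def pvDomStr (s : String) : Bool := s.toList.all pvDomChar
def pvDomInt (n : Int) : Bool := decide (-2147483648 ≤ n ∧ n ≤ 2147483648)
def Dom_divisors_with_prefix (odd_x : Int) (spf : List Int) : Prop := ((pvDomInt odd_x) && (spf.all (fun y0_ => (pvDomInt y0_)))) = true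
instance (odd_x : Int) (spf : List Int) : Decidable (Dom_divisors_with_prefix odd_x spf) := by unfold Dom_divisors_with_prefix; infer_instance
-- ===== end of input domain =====

-- B replaces A's generate-then-sort by merging sorted runs (divisors sorted by construction)
-- and builds the prefix list by appending; same return value, objective: alternative algorithm.

-- ===== PORT A =====
-- shared factorization helper: the SPF while-loops both Pythons contain, with fuel x.toNat
-- (under Pre_ every outer step strictly shrinks x, so the fuel is never exhausted there)
def spfInner (p : Int) : Nat → Int → Int → Int × Int
  | 0, x, e => (x, e)
  | fuel + 1, x, e =>
    if PySem.Int.mod x p = 0 then spfInner p fuel (PySem.Int.floordiv x p) (e + 1)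
    else (x, e)

def spfFactor (spf : List Int) : Nat → Int → List (Int × Int) → List (Int × Int)
  | 0, _, acc => acc
  | fuel + 1, x, acc =>
    if 1 < x then
      let p := PySem.List.pyGetD spf x 0
      let r := spfInner p x.toNat x 0
      spfFactor spf fuel r.1 (acc ++ [(p, r.2)])
    else acc

-- A's per-factor block: base = divs[:]; mult loop appending d * mult for d in base
def genA (divs : List Int) (pe : Int × Int) : List Int :=
  let base := divs
  ((PySem.List.pyRange 0 pe.2 1).foldl
    (fun (st : List Int × Int) _ =>
      let mult := st.2 * pe.1
      (base.foldl (fun acc d => acc ++ [d * mult]) st.1, mult))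
    (divs, 1)).1

def divisors_with_prefix (odd_x : Int) (spf : List Int) : List Int × List Int × Int :=
  if odd_x = 1 then ([1], [0, 1], 1)
  else
    let factors := spfFactor spf odd_x.toNat odd_x []
    let divs0 := factors.foldl genA [1]
    let divs := PySem.List.sorted divs0 (fun d => d) false
    let r := (PySem.List.enumerate divs 1).foldl
      (fun (st : List Int × Int) iv =>
        let s := st.2 + iv.2
        (PySem.List.pySetD st.1 iv.1 s, s))
      (List.replicate (divs.length + 1) 0, 0)
    (divs, r.1, r.2)

-- ===== PORT B =====
-- Source B's _merge: the two-pointer merge of two sorted lists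
def mergeB : List Int → List Int → List Int
  | [], b => b
  | a, [] => a
  | x :: xs, y :: ys =>
    if x ≤ y then x :: mergeB xs (y :: ys) else y :: mergeB (x :: xs) ys
  termination_by a b => a.length + b.length

-- B's per-factor block: merge the run [d * mult for d in divs] into the current sorted list
def genB (divs : List Int) (pe : Int × Int) : List Int :=
  ((PySem.List.pyRange 0 pe.2 1).foldl
    (fun (st : List Int × Int) _ =>
      let mult := st.2 * pe.1
      (mergeB st.1 (divs.map (fun d => d * mult)), mult))
    (divs, 1)).1

def divisors_with_prefix_alt (odd_x : Int) (spf : List Int) : List Int × List Int × Int :=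
  if odd_x = 1 then ([1], [0, 1], 1)
  else
    let factors := spfFactor spf odd_x.toNat odd_x []
    let divs := factors.foldl genB [1]
    let r := divs.foldl (fun (st : List Int × Int) v => (st.1 ++ [st.2 + v], st.2 + v)) ([0], 0)
    (divs, r.1, r.2)

-- ===== PRECONDITION & SPEC =====
-- Pre_ excludes SPF tables that are not globally valid (some entry with spf[i] < 2 or spf[i] ∤ i) and
-- x out of the table's range: on bad tables A raises IndexError/ZeroDivisionError or loops forever,
-- and whether it returns is data-dependent along the visited chain, so the closed-form Pre_ demands a
-- fully valid table (it thereby also excludes some chains A happens to finish, where B agrees with A).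
def Pre_divisors_with_prefix (odd_x : Int) (spf : List Int) : Prop :=
  2 ≤ odd_x →
    odd_x < (spf.length : Int) ∧
      ∀ (i : Nat) (_ : i < spf.length), 2 ≤ i → 2 ≤ spf[i]! ∧ spf[i]! ∣ (i : Int)
instance (odd_x : Int) (spf : List Int) : Decidable (Pre_divisors_with_prefix odd_x spf) := by
  unfold Pre_divisors_with_prefix; infer_instance
def pvWitness_divisors_with_prefix : Int × List Int := (9, [0, 0, 2, 3, 2, 5, 2, 7, 2, 3])

def Spec_divisors_with_prefix (odd_x : Int) (spf : List Int) (out : List Int × List Int × Int) : Prop := out = divisors_with_prefix_alt odd_x spf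
instance (odd_x : Int) (spf : List Int) (out : List Int × List Int × Int) : Decidable (Spec_divisors_with_prefix odd_x spf out) := by unfold Spec_divisors_with_prefix; infer_instance

-- ===== CLAIM (what is proved, stated in full; the proofs are below) =====
def Claim_equal_divisors_with_prefix : Prop := ∀ (odd_x : Int) (spf : List Int), Dom_divisors_with_prefix odd_x spf → Pre_divisors_with_prefix odd_x spf → Spec_divisors_with_prefix odd_x spf (divisors_with_prefix odd_x spf)

-- ===== LEMMAS AND PROOFS =====

theorem mergeB_perm : ∀ a b : List Int, (mergeB a b).Perm (a ++ b) := by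
  intro a b
  fun_induction mergeB a b with
  | case1 b => simp
  | case2 a h => simp
  | case3 x xs y ys h ih => exact (ih.cons x)
  | case4 x xs y ys h ih => exact ((ih.cons y).trans (List.perm_middle).symm)

theorem mergeB_pairwise : ∀ a b : List Int, a.Pairwise (· ≤ ·) → b.Pairwise (· ≤ ·) →
    (mergeB a b).Pairwise (· ≤ ·) := by
  intro a b ha hb
  fun_induction mergeB a b with
  | case1 b => exact hb
  | case2 a h => exact ha
  | case3 x xs y ys h ih =>
    rw [List.pairwise_cons] at ha ⊢
    refine ⟨?_, ih ha.2 hb⟩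
    intro z hz
    have hz' := (mergeB_perm xs (y :: ys)).mem_iff.mp hz
    rcases List.mem_append.mp hz' with h1 | h1
    · exact ha.1 z h1
    · rcases List.mem_cons.mp h1 with rfl | h2
      · exact h
      · exact le_trans h ((List.pairwise_cons.mp hb).1 z h2)
  | case4 x xs y ys h ih =>
    rw [List.pairwise_cons] at hb ⊢
    refine ⟨?_, ih ha hb.2⟩
    intro z hz
    have hz' := (mergeB_perm (x :: xs) ys).mem_iff.mp hz
    rw [not_le] at h
    rcases List.mem_append.mp hz' with h1 | h1
    · rcases List.mem_cons.mp h1 with rfl | h2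
      · exact le_of_lt h
      · exact le_trans (le_of_lt h) ((List.pairwise_cons.mp ha).1 z h2)
    · exact hb.1 z h1

theorem pairwise_map_mul {l : List Int} {m : Int} (h : l.Pairwise (· ≤ ·)) (hm : 0 ≤ m) :
    (l.map (fun d => d * m)).Pairwise (· ≤ ·) := by
  rw [List.pairwise_map]
  exact h.imp (fun hab => mul_le_mul_of_nonneg_right hab hm)

-- one step-list fold of genA's body vs genB's body, related state
theorem gen_fold (p : Int) (hp : 0 ≤ p) (base divsB : List Int)
    (hbd : base.Perm divsB) (hsd : divsB.Pairwise (· ≤ ·)) :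
    ∀ (l : List Int) (stA stB : List Int × Int),
      stA.1.Perm stB.1 → stA.2 = stB.2 → 0 ≤ stB.2 → stB.1.Pairwise (· ≤ ·) →
      (l.foldl (fun (st : List Int × Int) _ =>
          let mult := st.2 * p
          (base.foldl (fun acc d => acc ++ [d * mult]) st.1, mult)) stA).1.Perm
        (l.foldl (fun (st : List Int × Int) _ =>
          let mult := st.2 * p
          (mergeB st.1 (divsB.map (fun d => d * mult)), mult)) stB).1 ∧
      (l.foldl (fun (st : List Int × Int) _ =>
          let mult := st.2 * p
          (base.foldl (fun acc d => acc ++ [d * mult]) st.1, mult)) stA).2 =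
        (l.foldl (fun (st : List Int × Int) _ =>
          let mult := st.2 * p
          (mergeB st.1 (divsB.map (fun d => d * mult)), mult)) stB).2 ∧
      0 ≤ (l.foldl (fun (st : List Int × Int) _ =>
          let mult := st.2 * p
          (mergeB st.1 (divsB.map (fun d => d * mult)), mult)) stB).2 ∧
      (l.foldl (fun (st : List Int × Int) _ =>
          let mult := st.2 * p
          (mergeB st.1 (divsB.map (fun d => d * mult)), mult)) stB).1.Pairwise (· ≤ ·) := by
  intro l
  induction l with
  | nil => intro stA stB h1 h2 h3 h4; exact ⟨h1, h2, h3, h4⟩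
  | cons c cs ih =>
    intro stA stB h1 h2 h3 h4
    simp only [List.foldl_cons]
    apply ih
    · show (base.foldl (fun acc d => acc ++ [d * (stA.2 * p)]) stA.1).Perm
        (mergeB stB.1 (divsB.map (fun d => d * (stB.2 * p))))
      rw [PySem.List.foldl_append_singleton_eq_map, h2]
      exact ((h1.append (hbd.map _)).trans (mergeB_perm _ _).symm)
    · simp [h2]
    · exact mul_nonneg h3 hp
    · exact mergeB_pairwise _ _ h4 (pairwise_map_mul hsd (mul_nonneg h3 hp))

theorem gen_all : ∀ (fs : List (Int × Int)), (∀ q ∈ fs, 0 ≤ q.1) →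
    ∀ (a b : List Int), a.Perm b → b.Pairwise (· ≤ ·) →
    (fs.foldl genA a).Perm (fs.foldl genB b) ∧ (fs.foldl genB b).Pairwise (· ≤ ·) := by
  intro fs
  induction fs with
  | nil => intro _ a b h1 h2; exact ⟨h1, h2⟩
  | cons q qs ih =>
    intro hq a b h1 h2
    simp only [List.foldl_cons]
    have hp : 0 ≤ q.1 := hq q (List.mem_cons_self)
    have step := gen_fold q.1 hp a b h1 h2 (PySem.List.pyRange 0 q.2 1) (a, 1) (b, 1)
      h1 rfl (by norm_num) h2
    exact ih (fun r hr => hq r (List.mem_cons_of_mem _ hr)) (genA a q) (genB b q)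
      step.1 step.2.2.2

-- reference prefix scan
def refScan : Int → List Int → List Int
  | _, [] => []
  | s, v :: t => (s + v) :: refScan (s + v) t

theorem preB_fold : ∀ (l acc : List Int) (s : Int),
    l.foldl (fun (st : List Int × Int) v => (st.1 ++ [st.2 + v], st.2 + v)) (acc, s)
      = (acc ++ refScan s l, s + l.sum) := by
  intro l
  induction l with
  | nil => intro acc s; simp [refScan]
  | cons v t ih =>
    intro acc s
    simp only [List.foldl_cons, refScan, ih]
    apply Prod.ext
    · simp
    · simp; ring

theorem set_append_len : ∀ (front : List Int) (x : Int) (rest : List Int) (v : Int),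
    (front ++ x :: rest).set front.length v = front ++ v :: rest := by
  intro front
  induction front with
  | nil => intro x rest v; simp
  | cons a f ih => intro x rest v; simp [ih]

theorem preA_fold : ∀ (l front : List Int) (s : Int),
    (PySem.List.enumerate l (front.length : Int)).foldl
      (fun (st : List Int × Int) iv =>
        let s := st.2 + iv.2
        (PySem.List.pySetD st.1 iv.1 s, s))
      (front ++ List.replicate l.length 0, s)
      = (front ++ refScan s l, s + l.sum) := by
  intro l
  induction l with
  | nil => intro front s; simp [PySem.List.enumerate, refScan]
  | cons v t ih =>
    intro front s
    rw [PySem.List.enumerate_cons]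
    simp only [List.foldl_cons, List.length_cons, List.replicate_succ]
    rw [PySem.List.pySetD_natCast, set_append_len]
    have h1 : ((front.length : Int) + 1) = (((front ++ [s + v]).length : Nat) : Int) := by
      simp
    have h2 : front ++ (s + v) :: List.replicate t.length 0
        = (front ++ [s + v]) ++ List.replicate t.length 0 := by simp
    rw [h1, h2, ih (front ++ [s + v]) (s + v)]
    simp [refScan]; ring

theorem spfInner_bounds (p : Int) (hp : 0 < p) : ∀ (fuel : Nat) (x e : Int), 0 ≤ x →
    0 ≤ (spfInner p fuel x e).1 ∧ (spfInner p fuel x e).1 ≤ x := by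
  intro fuel
  induction fuel with
  | zero => intro x e hx; simp [spfInner]; exact hx
  | succ f ih =>
    intro x e hx
    simp only [spfInner]
    split
    · have hdiv : PySem.Int.floordiv x p = x / p := PySem.Int.floordiv_eq_ediv_of_pos hp
      have h0 : 0 ≤ x / p := Int.ediv_nonneg hx (le_of_lt hp)
      have h1 : x / p ≤ x := Int.ediv_le_self p hx
      have := ih (PySem.Int.floordiv x p) (e + 1) (by rw [hdiv]; exact h0)
      exact ⟨this.1, le_trans this.2 (by rw [hdiv]; exact h1)⟩
    · exact ⟨hx, le_refl x⟩

theorem spfFactor_pos (spf : List Int)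
    (hv : ∀ (i : Nat) (_ : i < spf.length), 2 ≤ i → 2 ≤ spf[i]! ∧ spf[i]! ∣ (i : Int)) :
    ∀ (fuel : Nat) (x : Int) (acc : List (Int × Int)), x < (spf.length : Int) →
      (∀ q ∈ acc, 0 ≤ q.1) → ∀ q ∈ spfFactor spf fuel x acc, 0 ≤ q.1 := by
  intro fuel
  induction fuel with
  | zero => intro x acc _ hacc; simpa [spfFactor] using hacc
  | succ f ih =>
    intro x acc hx hacc
    simp only [spfFactor]
    split
    · rename_i h1
      have hx0 : (0:Int) ≤ x := by omega
      have hlt : x.toNat < spf.length := by omega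
      have hpe : PySem.List.pyGetD spf x 0 = spf[x.toNat]! := by
        rw [PySem.List.pyGetD_eq_getElem spf 0 hx0 (by exact_mod_cast hx)]
        rw [List.getElem!_eq_getElem?_getD]; simp [List.getElem?_eq_getElem hlt]
      have h2i : 2 ≤ x.toNat := by omega
      have hp2 : 2 ≤ PySem.List.pyGetD spf x 0 := by
        rw [hpe]; exact (hv x.toNat hlt h2i).1
      have hb := spfInner_bounds (PySem.List.pyGetD spf x 0) (by omega) x.toNat x 0 hx0
      apply ih
      · omega
      · intro q hq
        rcases List.mem_append.mp hq with hq1 | hq1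
        · exact hacc q hq1
        · simp at hq1; rw [hq1]; omega
    · exact hacc

-- ===== VERDICT (by name: the statement is the Claim_ definition above) =====
theorem preA_top (l : List Int) :
    (PySem.List.enumerate l 1).foldl
      (fun (st : List Int × Int) iv =>
        let s := st.2 + iv.2
        (PySem.List.pySetD st.1 iv.1 s, s))
      (List.replicate (l.length + 1) 0, 0) = ([0] ++ refScan 0 l, 0 + l.sum) := by
  have h := preA_fold l [0] 0
  have h1 : (([0] : List Int).length : Int) = 1 := by simp
  have h2 : ([0] : List Int) ++ List.replicate l.length 0 = List.replicate (l.length + 1) 0 := by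
    simp [List.replicate_succ]
  rw [h1, h2] at h
  exact h

theorem divisors_with_prefix_spec : Claim_equal_divisors_with_prefix := by
  intro odd_x spf _ hpre
  unfold Spec_divisors_with_prefix
  by_cases h1 : odd_x = 1
  · simp [divisors_with_prefix, divisors_with_prefix_alt, h1]
  · have hfs : ∀ q ∈ spfFactor spf odd_x.toNat odd_x [], 0 ≤ q.1 := by
      by_cases h2 : 2 ≤ odd_x
      · exact spfFactor_pos spf (hpre h2).2 _ _ _ (hpre h2).1 (by simp)
      · have h0 : odd_x.toNat = 0 := by omega
        rw [h0]; simp [spfFactor]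
    obtain ⟨hperm, hpair⟩ := gen_all _ hfs [1] [1] (List.Perm.refl _) (by simp)
    have hsorted :
        PySem.List.sorted ((spfFactor spf odd_x.toNat odd_x []).foldl genA [1]) (fun d => d) false
          = (spfFactor spf odd_x.toNat odd_x []).foldl genB [1] :=
      PySem.List.sorted_id_eq_of_perm_of_pairwise _ _ hperm.symm hpair
    simp only [divisors_with_prefix, divisors_with_prefix_alt, if_neg h1]
    rw [hsorted, preA_top, preB_fold]
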